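-- pv_equiv track=rewrite | github.com/chrismellorex1/Python-examples | OFF_NH2_Overrides.py | wave_range
-- ===== SOURCE A (Python) =====
-- def wave_range(avg):
--     # Make wave ranges based off the average wave value
--     table = ((0, "3 ft or less"), (1, "3 ft or less"),
--              (1.5, "3 ft or less"), (2, "3 ft or less"),
--              (3, "3 ft or less"), (4, "2 to 4 ft"),
--              (5, "3 to 5 ft"), (6, "4 to 6 ft"),
--              (7, "5 to 7 ft"), (8, "6 to 8 ft"),
--              (9, "6 to 9 ft"), (10, "7 to 10 ft"),
--              (11, "7 to 11 ft"), (12, "8 to 12 ft"),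
--              (13, "9 to 13 ft"), (14, "9 to 14 ft"),
--              (15, "10 to 15 ft"), (16, "10 to 16 ft"),
--              (17, "11 to 17 ft"), (18, "12 to 18 ft"),
--              (19, "12 to 19 ft"), (20, "13 to 20 ft"),
--              (21, "14 to 21 ft"), (22, "14 to 22 ft"),
--              (23, "15 to 23 ft"), (24, "16 to 24 ft"),
--              (25, "16 to 25 ft"), (26, "17 to 26 ft"),
--              (27, "18 to 27 ft"), (28, "19 to 28 ft"),
--              (29, "19 to 29 ft"), (30, "20 to 30 ft"),
--              (31, "21 to 31 ft"), (32, "21 to 32 ft"),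
--              (33, "22 to 33 ft"), (34, "22 to 34 ft"),
--              (35, "23 to 35 ft"), (36, "24 to 36 ft"),
--              (37, "25 to 37 ft"), (38, "26 to 38 ft"),
--              (39, "26 to 39 ft"), (40, "27 to 40 ft"),
--              (45, "30 to 45 ft"), (50, "33 to 50 ft"),
--              (55, "over 50 ft"))
--     range = ""
--     for max, str in table:
--         if avg <= max:
--             range = str
--             break
--     return range
-- ===== SOURCE B (Python) =====
-- import bisect
--
-- _THRESHOLDS = [0, 1, 2, 3, 4, 5, 6, 7, 8, 9, 10, 11, 12, 13, 14, 15, 16, 17,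
--                18, 19, 20, 21, 22, 23, 24, 25, 26, 27, 28, 29, 30, 31, 32, 33,
--                34, 35, 36, 37, 38, 39, 40, 45, 50, 55]
-- _LABELS = ["3 ft or less", "3 ft or less", "3 ft or less", "3 ft or less",
--            "2 to 4 ft", "3 to 5 ft", "4 to 6 ft",
--            "5 to 7 ft", "6 to 8 ft", "6 to 9 ft", "7 to 10 ft",
--            "7 to 11 ft", "8 to 12 ft", "9 to 13 ft", "9 to 14 ft",
--            "10 to 15 ft", "10 to 16 ft", "11 to 17 ft", "12 to 18 ft",
--            "12 to 19 ft", "13 to 20 ft", "14 to 21 ft", "14 to 22 ft",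
--            "15 to 23 ft", "16 to 24 ft", "16 to 25 ft", "17 to 26 ft",
--            "18 to 27 ft", "19 to 28 ft", "19 to 29 ft", "20 to 30 ft",
--            "21 to 31 ft", "21 to 32 ft", "22 to 33 ft", "22 to 34 ft",
--            "23 to 35 ft", "24 to 36 ft", "25 to 37 ft", "26 to 38 ft",
--            "26 to 39 ft", "27 to 40 ft", "30 to 45 ft", "33 to 50 ft",
--            "over 50 ft"]
--
-- def wave_range(avg):
--     # binary search for the smallest threshold >= avg
--     i = bisect.bisect_left(_THRESHOLDS, avg)
--     return _LABELS[i] if i < len(_LABELS) else ""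
-- ===== Notes on version B (the rewrite author's own statement) =====
-- stated objective: idiomatic
-- what changed: Replaces the linear first-hit scan over (threshold,label) tuples by a bisect_left binary search over a sorted threshold list with a parallel label list.
import Mathlib
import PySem

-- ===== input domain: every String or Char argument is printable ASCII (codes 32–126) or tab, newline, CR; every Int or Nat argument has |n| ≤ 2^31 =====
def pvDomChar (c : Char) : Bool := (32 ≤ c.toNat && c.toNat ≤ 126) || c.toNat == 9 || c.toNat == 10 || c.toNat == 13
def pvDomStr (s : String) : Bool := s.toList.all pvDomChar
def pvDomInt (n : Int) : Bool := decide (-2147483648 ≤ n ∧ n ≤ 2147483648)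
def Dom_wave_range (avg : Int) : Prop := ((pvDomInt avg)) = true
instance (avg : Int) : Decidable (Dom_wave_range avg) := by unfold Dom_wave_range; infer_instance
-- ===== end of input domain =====

-- B replaces A's linear first-hit scan of the table by a bisect_left binary search
-- over a sorted threshold list with a parallel label list (idiomatic; same output).

-- ===== PORT A =====
-- A's table. The Python entry (1.5, "3 ft or less") is ported as (1, "3 ft or less"):
-- for an Int avg, avg <= 1.5 holds exactly when avg <= 1, so this is exact on the Int domain.
def waveTableA : List (Int × String) :=
  [(0, "3 ft or less"), (1, "3 ft or less"),
   (1, "3 ft or less"), (2, "3 ft or less"),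
   (3, "3 ft or less"), (4, "2 to 4 ft"),
   (5, "3 to 5 ft"), (6, "4 to 6 ft"),
   (7, "5 to 7 ft"), (8, "6 to 8 ft"),
   (9, "6 to 9 ft"), (10, "7 to 10 ft"),
   (11, "7 to 11 ft"), (12, "8 to 12 ft"),
   (13, "9 to 13 ft"), (14, "9 to 14 ft"),
   (15, "10 to 15 ft"), (16, "10 to 16 ft"),
   (17, "11 to 17 ft"), (18, "12 to 18 ft"),
   (19, "12 to 19 ft"), (20, "13 to 20 ft"),
   (21, "14 to 21 ft"), (22, "14 to 22 ft"),
   (23, "15 to 23 ft"), (24, "16 to 24 ft"),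
   (25, "16 to 25 ft"), (26, "17 to 26 ft"),
   (27, "18 to 27 ft"), (28, "19 to 28 ft"),
   (29, "19 to 29 ft"), (30, "20 to 30 ft"),
   (31, "21 to 31 ft"), (32, "21 to 32 ft"),
   (33, "22 to 33 ft"), (34, "22 to 34 ft"),
   (35, "23 to 35 ft"), (36, "24 to 36 ft"),
   (37, "25 to 37 ft"), (38, "26 to 38 ft"),
   (39, "26 to 39 ft"), (40, "27 to 40 ft"),
   (45, "30 to 45 ft"), (50, "33 to 50 ft"),
   (55, "over 50 ft")]

-- the for-loop with break: first entry whose max satisfies avg <= max, else the initial ""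
def waveLoopA (avg : Int) : List (Int × String) → String
  | [] => ""
  | (mx, s) :: rest => if avg ≤ mx then s else waveLoopA avg rest

def wave_range (avg : Int) : String := waveLoopA avg waveTableA

-- ===== PORT B =====
def waveThresholds : List Int :=
  [0, 1, 2, 3, 4, 5, 6, 7, 8, 9, 10, 11, 12, 13, 14, 15, 16, 17,
   18, 19, 20, 21, 22, 23, 24, 25, 26, 27, 28, 29, 30, 31, 32, 33,
   34, 35, 36, 37, 38, 39, 40, 45, 50, 55]

def waveLabels : List String :=
  ["3 ft or less", "3 ft or less", "3 ft or less", "3 ft or less",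
   "2 to 4 ft", "3 to 5 ft", "4 to 6 ft",
   "5 to 7 ft", "6 to 8 ft", "6 to 9 ft", "7 to 10 ft",
   "7 to 11 ft", "8 to 12 ft", "9 to 13 ft", "9 to 14 ft",
   "10 to 15 ft", "10 to 16 ft", "11 to 17 ft", "12 to 18 ft",
   "12 to 19 ft", "13 to 20 ft", "14 to 21 ft", "14 to 22 ft",
   "15 to 23 ft", "16 to 24 ft", "16 to 25 ft", "17 to 26 ft",
   "18 to 27 ft", "19 to 28 ft", "19 to 29 ft", "20 to 30 ft",
   "21 to 31 ft", "21 to 32 ft", "22 to 33 ft", "22 to 34 ft",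
   "23 to 35 ft", "24 to 36 ft", "25 to 37 ft", "26 to 38 ft",
   "26 to 39 ft", "27 to 40 ft", "30 to 45 ft", "33 to 50 ft",
   "over 50 ft"]

-- hand port of bisect.bisect_left (lo=0, hi=len): exact binary search, same midpoints.
-- The fuel argument (initially a.length) only makes the recursion structural; it never
-- runs out, since hi - lo shrinks by at least 1 per step and starts at a.length.
def bisectLeftGo (a : List Int) (x : Int) : Nat → Nat → Nat → Nat
  | 0, lo, _ => lo
  | fuel + 1, lo, hi =>
    if lo < hi then
      let mid := (lo + hi) / 2
      if a.getD mid 0 < x then bisectLeftGo a x fuel (mid + 1) hi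
      else bisectLeftGo a x fuel lo mid
    else lo

def bisectLeft (a : List Int) (x : Int) : Nat := bisectLeftGo a x a.length 0 a.length

def wave_range_alt (avg : Int) : String :=
  let i := bisectLeft waveThresholds avg
  if i < waveLabels.length then waveLabels.getD i "" else ""

-- ===== PRECONDITION & SPEC =====
def Spec_wave_range (avg : Int) (out : String) : Prop := out = wave_range_alt avg
instance (avg : Int) (out : String) : Decidable (Spec_wave_range avg out) := by unfold Spec_wave_range; infer_instance

-- ===== CLAIM (what is proved, stated in full; the proofs are below) =====
def Claim_equal_wave_range : Prop := ∀ (avg : Int), Dom_wave_range avg → Spec_wave_range avg (wave_range avg)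

-- ===== LEMMAS AND PROOFS =====

-- binary search returns lo when no element is < x
theorem bisectLeftGo_all_ge (a : List Int) (x : Int)
    (h : ∀ i : Nat, ¬ a.getD i 0 < x) :
    ∀ fuel lo hi, bisectLeftGo a x fuel lo hi = lo := by
  intro fuel
  induction fuel with
  | zero => intro lo hi; rfl
  | succ fuel ih =>
    intro lo hi
    rw [bisectLeftGo]
    by_cases hlt : lo < hi
    · simp only [hlt, if_true, if_neg (h ((lo + hi) / 2))]
      exact ih lo ((lo + hi) / 2)
    · simp [hlt]

-- binary search returns hi when every in-range element is < x
theorem bisectLeftGo_all_lt (a : List Int) (x : Int)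
    (h : ∀ i : Nat, i < a.length → a.getD i 0 < x) :
    ∀ fuel lo hi, hi - lo ≤ fuel → hi ≤ a.length → lo ≤ hi →
      bisectLeftGo a x fuel lo hi = hi := by
  intro fuel
  induction fuel with
  | zero =>
    intro lo hi hn _ hle
    have : lo = hi := by omega
    simp [bisectLeftGo, this]
  | succ fuel ihn =>
    intro lo hi hn hlen hle
    rw [bisectLeftGo]
    by_cases hlt : lo < hi
    · have hmid : (lo + hi) / 2 < a.length := by omega
      simp only [hlt, if_true, if_pos (h _ hmid)]
      exact ihn _ _ (by omega) hlen (by omega)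
    · have : lo = hi := by omega
      simp [this]

theorem waveLoopA_all_lt (avg : Int) (l : List (Int × String))
    (h : ∀ p ∈ l, p.1 < avg) : waveLoopA avg l = "" := by
  induction l with
  | nil => rfl
  | cons p rest ih =>
    obtain ⟨mx, s⟩ := p
    have := h (mx, s) (List.mem_cons_self ..)
    simp only [waveLoopA, if_neg (by omega : ¬ avg ≤ mx)]
    exact ih fun q hq => h q (List.mem_cons_of_mem _ hq)

theorem waveThresholds_bounds :
    ∀ i : Nat, 0 ≤ waveThresholds.getD i 0 ∧ waveThresholds.getD i 0 ≤ 55 := by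
  have hall : ∀ y ∈ waveThresholds, (0 : Int) ≤ y ∧ y ≤ 55 := by decide
  intro i
  rcases Nat.lt_or_ge i waveThresholds.length with h | h
  · exact hall _ (by rw [List.getD_eq_getElem _ _ h]; exact List.getElem_mem h)
  · rw [List.getD_eq_default _ _ h]; exact ⟨le_refl 0, by omega⟩

theorem wave_range_eq (avg : Int) : wave_range avg = wave_range_alt avg := by
  rcases lt_trichotomy avg 1 with hneg | h1
  · -- avg ≤ 0: A hits the first table row; B's bisect finds index 0
    have ha : wave_range avg = "3 ft or less" := by
      simp [wave_range, waveTableA, waveLoopA, if_pos (by omega : avg ≤ (0 : Int))]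
    have hb : bisectLeft waveThresholds avg = 0 := by
      apply bisectLeftGo_all_ge
      intro i
      have := waveThresholds_bounds i
      omega
    rw [ha, wave_range_alt, hb]
    decide
  · rcases Nat.lt_or_ge 55 avg.toNat with hbig | hsmall
    · -- avg > 55: A's loop falls through; B's bisect returns the full length
      have havg : (55 : Int) < avg := by omega
      have htab : ∀ p ∈ waveTableA, p.1 ≤ 55 := by decide
      have ha : wave_range avg = "" := by
        apply waveLoopA_all_lt
        intro p hp
        have := htab p hp
        omega
      have hb : bisectLeft waveThresholds avg = waveThresholds.length := by
        apply bisectLeftGo_all_lt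
        · intro i _
          have := (waveThresholds_bounds i).2
          omega
        · omega
        · exact le_refl _
        · omega
      rw [ha, wave_range_alt, hb]
      decide
    · -- 1 ≤ avg ≤ 55: finitely many cases
      have h1' : (1 : Int) ≤ avg := by omega
      have h55 : avg ≤ 55 := by omega
      interval_cases avg <;> decide

-- ===== VERDICT (by name: the statement is the Claim_ definition above) =====
theorem wave_range_spec : Claim_equal_wave_range := by
  intro avg _
  exact wave_range_eq avg
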